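-- pv_equiv track=rewrite | github.com/GavinButts/SeniorThesis | Tableau.py | satisfies_triple_rule
-- ===== SOURCE A (Python) =====
-- def satisfies_triple_rule(tableau):
--     """Check if the tableau satisfies the triple rule in French notation."""
--     for i in range(len(tableau) - 1):  # Start from the second-to-last row
--         current_row = tableau[i]
--         for j, z in enumerate(current_row):
--             if j == 0:
--                 continue  # No left neighbor for z in this row
--
--             # Check rows above for left neighbor x
--             for k in range(i + 1, len(tableau)):  # Iterate through rows above
--                 if j - 1 < len(tableau[k]):  # Ensure left neighbor exists in row k
--                     x = tableau[k][j - 1]  # Left neighbor in row k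
--                     if x < z:
--                         # Check the element to the right of x in the same row
--                         if j < len(tableau[k]):  # If the right element exists
--                             x_right = tableau[k][j]
--                         else:  # If no element to the right, treat it as infinity
--                             x_right = float('inf')
--
--                         if not (x_right < z):  # Triple rule violation
--                             return False
--     return True
-- ===== SOURCE B (Python) =====
-- def _count_le(a, x):
--     """Number of elements <= x in the sorted list a (binary search)."""
--     lo, hi = 0, len(a)
--     while lo < hi:
--         mid = (lo + hi) // 2
--         if a[mid] <= x:
--             lo = mid + 1
--         else:
--             hi = mid
--     return lo
--
--
-- def satisfies_triple_rule(tableau):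
--     """Check if the tableau satisfies the triple rule in French notation."""
--     ncols = 0
--     for row in tableau:
--         if len(row) > ncols:
--             ncols = len(row)
--     for j in range(1, ncols + 1):
--         seen = []  # sorted values at column j of the rows processed so far
--         for row in tableau:
--             if j <= len(row):
--                 lo = row[j - 1]
--                 if j < len(row):
--                     cnt = _count_le(seen, row[j]) - _count_le(seen, lo)
--                 else:
--                     cnt = len(seen) - _count_le(seen, lo)
--                 if cnt > 0:
--                     return False
--             if j < len(row):
--                 z = row[j]
--                 seen.insert(_count_le(seen, z), z)
--     return True
-- ===== Notes on version B (the rewrite author's own statement) =====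
-- stated objective: faster
-- what changed: A checks every cell against every row above it (a triple nested scan); B sweeps each column once from the bottom row up, maintaining a sorted list of the column values seen so far and answering each 'is some earlier value in the interval (x, x_right]?' test with a hand-rolled binary search.
import Mathlib
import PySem

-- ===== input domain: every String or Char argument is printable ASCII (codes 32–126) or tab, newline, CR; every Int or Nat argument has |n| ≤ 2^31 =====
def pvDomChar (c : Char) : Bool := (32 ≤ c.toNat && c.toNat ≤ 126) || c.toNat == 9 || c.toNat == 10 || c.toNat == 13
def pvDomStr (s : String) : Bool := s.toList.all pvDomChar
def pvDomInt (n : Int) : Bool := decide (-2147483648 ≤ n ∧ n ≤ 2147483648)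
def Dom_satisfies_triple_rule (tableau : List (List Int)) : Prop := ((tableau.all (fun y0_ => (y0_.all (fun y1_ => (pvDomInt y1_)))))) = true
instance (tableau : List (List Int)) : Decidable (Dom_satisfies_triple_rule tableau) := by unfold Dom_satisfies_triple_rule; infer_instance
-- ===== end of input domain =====

-- B replaces A's cell-by-cell scan of all rows above (O(R^2*C)) by a per-column sweep that
-- maintains a sorted list of the column values seen so far and answers each "is some earlier
-- value in the interval?" test by binary search; measurably faster on non-violating tableaux.

-- ===== PORT A =====
-- literal transliteration of A; the 'float("inf")' branch: not (inf < z) is always True,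
-- so that branch reports a violation unconditionally (exact for integer z)
def satisfies_triple_rule (tableau : List (List Int)) : Bool :=
  !((PySem.List.pyRange 0 ((tableau.length : Int) - 1) 1).any (fun i =>
    let current_row := PySem.List.pyGetD tableau i []
    (PySem.List.enumerate current_row).any (fun jz =>
      if jz.1 == 0 then false
      else
        (PySem.List.pyRange (i + 1) (tableau.length : Int) 1).any (fun k =>
          let rowk := PySem.List.pyGetD tableau k []
          if jz.1 - 1 < (rowk.length : Int) then
            let x := PySem.List.pyGetD rowk (jz.1 - 1) 0
            if x < jz.2 then
              if jz.1 < (rowk.length : Int) then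
                let x_right := PySem.List.pyGetD rowk jz.1 0
                !(x_right < jz.2)
              else
                true
            else false
          else false))))

-- ===== PORT B =====
-- _count_le's while-loop (hand-written binary search in Source B), ported step for step;
-- lo/hi/mid are the same non-negative Python ints, so Nat with Nat division is exact here,
-- and a[mid] is in range whenever the loop reads it (lo < hi ≤ len a), so getD is exact
-- (the fuel argument only bounds the number of iterations: each pass shrinks hi - lo, which
-- starts at len a, so fuel = len a is never exhausted before the while-condition lo < hi fails)
def countLeGo (a : List Int) (x : Int) : Nat → Nat → Nat → Nat
  | 0, lo, _hi => lo
  | fuel + 1, lo, hi =>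
    if lo < hi then
      let mid := (lo + hi) / 2
      if a.getD mid 0 ≤ x then countLeGo a x fuel (mid + 1) hi else countLeGo a x fuel lo mid
    else lo

def count_le (a : List Int) (x : Int) : Nat := countLeGo a x a.length 0 a.length

-- the body of B's inner 'for row in tableau' loop (the early 'return False' is the flag st.2)
def bstep (j : Int) (st : List Int × Bool) (row : List Int) : List Int × Bool :=
  if st.2 then st
  else
    let bad :=
      if j ≤ (row.length : Int) then
        let lo := PySem.List.pyGetD row (j - 1) 0
        let cnt : Int :=
          if j < (row.length : Int) then
            (count_le st.1 (PySem.List.pyGetD row j 0) : Int) - (count_le st.1 lo : Int)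
          else (st.1.length : Int) - (count_le st.1 lo : Int)
        decide (0 < cnt)
      else false
    let seen' :=
      if j < (row.length : Int) then
        let z := PySem.List.pyGetD row j 0
        PySem.List.insert st.1 ((count_le st.1 z : Nat) : Int) z
      else st.1
    (seen', st.2 || bad)

def satisfies_triple_rule_alt (tableau : List (List Int)) : Bool :=
  let ncols := tableau.foldl (fun m row => if (row.length : Int) > m then (row.length : Int) else m) 0
  !((PySem.List.pyRange 1 (ncols + 1) 1).any (fun j =>
      (tableau.foldl (bstep j) ([], false)).2))

-- ===== PRECONDITION & SPEC =====
def Spec_satisfies_triple_rule (tableau : List (List Int)) (out : Bool) : Prop := out = satisfies_triple_rule_alt tableau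
instance (tableau : List (List Int)) (out : Bool) : Decidable (Spec_satisfies_triple_rule tableau out) := by unfold Spec_satisfies_triple_rule; infer_instance

-- ===== CLAIM (what is proved, stated in full; the proofs are below) =====
def Claim_equal_satisfies_triple_rule : Prop := ∀ (tableau : List (List Int)), Dom_satisfies_triple_rule tableau → Spec_satisfies_triple_rule tableau (satisfies_triple_rule tableau)

-- ===== LEMMAS AND PROOFS =====

-- the row at index n (out-of-range reads as [], only used in range)
def rowAt (t : List (List Int)) (n : Nat) : List Int := t.getD n []

-- the triple-rule violation both programs detect
def Viol (t : List (List Int)) : Prop :=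
  ∃ k, k < t.length ∧ ∃ i, i < k ∧ ∃ j : Nat, 1 ≤ j ∧ j ≤ (rowAt t k).length ∧
    j < (rowAt t i).length ∧ (rowAt t k).getD (j - 1) 0 < (rowAt t i).getD j 0 ∧
    (j < (rowAt t k).length → (rowAt t i).getD j 0 ≤ (rowAt t k).getD j 0)

-- values of column j in the given rows, top to bottom
def colVals (j : Nat) (rows : List (List Int)) : List Int :=
  rows.filterMap (fun r => if j < r.length then some (r.getD j 0) else none)

-- row 'row' (as upper row) is violated against some earlier column value in s
def BadRow (j : Nat) (s : List Int) (row : List Int) : Prop :=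
  j ≤ row.length ∧ ∃ z ∈ s, row.getD (j - 1) 0 < z ∧ (j < row.length → z ≤ row.getD j 0)

def ncolsOf (t : List (List Int)) : Int :=
  t.foldl (fun m row => if (row.length : Int) > m then (row.length : Int) else m) 0

lemma countP_diff (s : List Int) (lo hi : Int) :
    (s.countP (fun z => decide (z ≤ hi)) : Int) - s.countP (fun z => decide (z ≤ lo)) =
      (s.countP (fun z => decide (lo < z) && decide (z ≤ hi)) : Int) -
        s.countP (fun z => decide (hi < z) && decide (z ≤ lo)) := by
  induction s with
  | nil => simp
  | cons a s ih =>
    simp only [List.countP_cons]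
    by_cases h1 : a ≤ hi <;> by_cases h2 : a ≤ lo
    · simp only [h1, h2, not_lt.mpr h1, not_lt.mpr h2, decide_true, decide_false,
        Bool.false_and, if_true]
      push_cast
      omega
    · simp only [h1, h2, not_le.mp h2, not_lt.mpr h1, decide_true, decide_false,
        Bool.true_and, Bool.false_and, if_true]
      push_cast
      omega
    · simp only [h1, h2, not_le.mp h1, not_lt.mpr h2, decide_true, decide_false,
        Bool.and_false, Bool.and_true, if_true]
      push_cast
      omega
    · simp only [h1, h2, decide_false, Bool.and_false]
      push_cast
      omega

lemma window_iff (s : List Int) (lo hi : Int) :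
    ((0 : Int) < (s.countP (fun z => decide (z ≤ hi)) : Int) -
        s.countP (fun z => decide (z ≤ lo))) ↔ ∃ z ∈ s, lo < z ∧ z ≤ hi := by
  rw [countP_diff]
  constructor
  · intro h
    have hI : 0 < s.countP (fun z => decide (lo < z) && decide (z ≤ hi)) := by omega
    obtain ⟨z, hz, hp⟩ := List.countP_pos_iff.mp hI
    simp only [Bool.and_eq_true, decide_eq_true_eq] at hp
    exact ⟨z, hz, hp⟩
  · rintro ⟨z, hz, h1, h2⟩
    have hJ : s.countP (fun z => decide (hi < z) && decide (z ≤ lo)) = 0 :=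
      List.countP_eq_zero.mpr (by intro b _; simp; omega)
    have hI : 0 < s.countP (fun z => decide (lo < z) && decide (z ≤ hi)) :=
      List.countP_pos_iff.mpr ⟨z, hz, by simp [h1, h2]⟩
    omega

lemma tail_window_iff (s : List Int) (lo : Int) :
    ((0 : Int) < (s.length : Int) - s.countP (fun z => decide (z ≤ lo))) ↔ ∃ z ∈ s, lo < z := by
  have hsplit : s.length = s.countP (fun z => decide (z ≤ lo)) +
      s.countP (fun z => decide (lo < z)) := by
    rw [List.length_eq_countP_add_countP (fun z => decide (z ≤ lo))]
    congr 1
    apply List.countP_congr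
    intro a _
    simp [not_le]
  rw [hsplit]
  constructor
  · intro h
    have hI : 0 < s.countP (fun z => decide (lo < z)) := by omega
    obtain ⟨z, hz, hp⟩ := List.countP_pos_iff.mp hI
    exact ⟨z, hz, by simpa using hp⟩
  · rintro ⟨z, hz, h1⟩
    have hI : 0 < s.countP (fun z => decide (lo < z)) :=
      List.countP_pos_iff.mpr ⟨z, hz, by simpa using h1⟩
    omega

lemma countP_of_split (a : List Int) (x : Int) (lo : Nat) (hlo : lo ≤ a.length)
    (h1 : ∀ p, p < lo → a.getD p 0 ≤ x)
    (h2 : ∀ p, lo ≤ p → p < a.length → x < a.getD p 0) :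
    a.countP (fun z => decide (z ≤ x)) = lo := by
  have hT : (a.take lo).countP (fun z => decide (z ≤ x)) = lo := by
    rw [List.countP_eq_length.mpr]
    · rw [List.length_take]; omega
    · intro y hy
      obtain ⟨p, hp, hpe⟩ := List.getElem_of_mem hy
      rw [List.getElem_take] at hpe
      rw [List.length_take] at hp
      have hpl : p < a.length := by omega
      have := h1 p (by omega)
      rw [List.getD_eq_getElem a 0 hpl] at this
      simp [← hpe, this]
  have hD : (a.drop lo).countP (fun z => decide (z ≤ x)) = 0 := by
    rw [List.countP_eq_zero]
    intro y hy
    obtain ⟨p, hp, hpe⟩ := List.getElem_of_mem hy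
    rw [List.getElem_drop] at hpe
    rw [List.length_drop] at hp
    have hpl : lo + p < a.length := by omega
    have := h2 (lo + p) (by omega) hpl
    rw [List.getD_eq_getElem a 0 hpl] at this
    simp [← hpe]
    omega
  calc a.countP (fun z => decide (z ≤ x))
      = ((a.take lo) ++ (a.drop lo)).countP (fun z => decide (z ≤ x)) := by
        rw [List.take_append_drop]
    _ = (List.take lo a).countP (fun z => decide (z ≤ x)) +
          (List.drop lo a).countP (fun z => decide (z ≤ x)) := List.countP_append ..
    _ = lo := by rw [hT, hD]; omega

lemma countLeGo_eq (a : List Int) (x : Int) (hs : a.Pairwise (· ≤ ·)) :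
    ∀ (fuel lo hi : Nat), hi ≤ a.length → lo ≤ hi → hi - lo ≤ fuel →
      (∀ p, p < lo → a.getD p 0 ≤ x) →
      (∀ p, hi ≤ p → p < a.length → x < a.getD p 0) →
      countLeGo a x fuel lo hi = a.countP (fun z => decide (z ≤ x)) := by
  intro fuel
  induction fuel with
  | zero =>
    intro lo hi hh hl hf h1 h2
    have he : lo = hi := by omega
    subst he
    exact (countP_of_split a x lo (by omega) h1 (by intro p hp hpl; exact h2 p hp hpl)).symm
  | succ fuel ih =>
    intro lo hi hh hl hf h1 h2
    have hunf : countLeGo a x (fuel + 1) lo hi =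
        if lo < hi then
          (if a.getD ((lo + hi) / 2) 0 ≤ x then countLeGo a x fuel ((lo + hi) / 2 + 1) hi
           else countLeGo a x fuel lo ((lo + hi) / 2))
        else lo := rfl
    by_cases hlt : lo < hi
    · have hmid : lo ≤ (lo + hi) / 2 ∧ (lo + hi) / 2 < hi := by omega
      by_cases hx : a.getD ((lo + hi) / 2) 0 ≤ x
      · rw [hunf, if_pos hlt, if_pos hx]
        apply ih _ _ hh (by omega) (by omega) ?_ h2
        intro p hp
        have hpl : p < a.length := by omega
        rcases Nat.lt_or_ge p ((lo + hi) / 2) with hpm | hpm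
        · have hml : (lo + hi) / 2 < a.length := by omega
          have hmono := List.pairwise_iff_getElem.mp hs p ((lo + hi) / 2) hpl hml hpm
          rw [List.getD_eq_getElem a 0 hpl]
          rw [List.getD_eq_getElem a 0 hml] at hx
          exact le_trans hmono hx
        · have hpe : p = (lo + hi) / 2 := by omega
          rw [hpe]; exact hx
      · rw [hunf, if_pos hlt, if_neg hx]
        apply ih _ _ (by omega) (by omega) (by omega) h1 ?_
        intro p hp hpl
        have hml : (lo + hi) / 2 < a.length := by omega
        rcases Nat.lt_or_ge ((lo + hi) / 2) p with hpm | hpm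
        · have hmono := List.pairwise_iff_getElem.mp hs ((lo + hi) / 2) p hml hpl hpm
          rw [List.getD_eq_getElem a 0 hpl]
          rw [List.getD_eq_getElem a 0 hml] at hx
          exact lt_of_lt_of_le (not_le.mp hx) hmono
        · have hpe : p = (lo + hi) / 2 := by omega
          rw [hpe]; exact not_le.mp hx
    · have he : lo = hi := by omega
      subst he
      rw [hunf, if_neg hlt]
      exact (countP_of_split a x lo (by omega) h1 (by intro p hp hpl; exact h2 p hp hpl)).symm

lemma count_le_eq (a : List Int) (x : Int) (hs : a.Pairwise (· ≤ ·)) :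
    count_le a x = a.countP (fun z => decide (z ≤ x)) := by
  apply countLeGo_eq a x hs a.length 0 a.length le_rfl (Nat.zero_le _) (by omega)
  · intro p hp; omega
  · intro p hp hpl; omega

lemma take_drop_countP (s : List Int) (z : Int) (hs : s.Pairwise (· ≤ ·)) :
    (∀ y ∈ s.take (s.countP (fun w => decide (w ≤ z))), y ≤ z) ∧
    (∀ y ∈ s.drop (s.countP (fun w => decide (w ≤ z))), z < y) := by
  induction s with
  | nil => simp
  | cons a s ih =>
    obtain ⟨ha, hs'⟩ := List.pairwise_cons.mp hs
    obtain ⟨ihT, ihD⟩ := ih hs'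
    by_cases haz : a ≤ z
    · have hc : (a :: s).countP (fun w => decide (w ≤ z)) =
          s.countP (fun w => decide (w ≤ z)) + 1 := by simp [haz]
      rw [hc]
      refine ⟨?_, ?_⟩
      · intro y hy
        rw [List.take_succ_cons] at hy
        rcases List.mem_cons.mp hy with rfl | hy'
        · exact haz
        · exact ihT y hy'
      · intro y hy
        rw [List.drop_succ_cons] at hy
        exact ihD y hy
    · have hz : ∀ b ∈ a :: s, ¬ (b ≤ z) := by
        intro b hb
        rcases List.mem_cons.mp hb with rfl | hb'
        · exact haz
        · have := ha b hb'; omega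
      have hc : (a :: s).countP (fun w => decide (w ≤ z)) = 0 :=
        List.countP_eq_zero.mpr (by intro b hb; simpa using hz b hb)
      rw [hc]
      exact ⟨by simp, by intro y hy; exact not_le.mp (hz y (by simpa using hy))⟩

lemma insert_sorted (s : List Int) (z : Int) (hs : s.Pairwise (· ≤ ·)) :
    (PySem.List.insert s ((count_le s z : Nat) : Int) z).Perm (z :: s) ∧
    (PySem.List.insert s ((count_le s z : Nat) : Int) z).Pairwise (· ≤ ·) := by
  have hc := count_le_eq s z hs
  have hle : s.countP (fun w => decide (w ≤ z)) ≤ s.length := List.countP_le_length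
  rw [hc, PySem.List.insert_natCast s _ z hle]
  obtain ⟨hT, hD⟩ := take_drop_countP s z hs
  constructor
  · have he : z :: (s.take (s.countP (fun w => decide (w ≤ z))) ++
        s.drop (s.countP (fun w => decide (w ≤ z)))) = z :: s := by
      rw [List.take_append_drop]
    exact List.perm_middle.trans (he ▸ List.Perm.refl _)
  · rw [List.pairwise_append]
    refine ⟨hs.take, ?_, ?_⟩
    · rw [List.pairwise_cons]
      exact ⟨fun y hy => le_of_lt (hD y hy), hs.drop⟩
    · intro y1 hy1 y2 hy2
      rcases List.mem_cons.mp hy2 with rfl | hy2'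
      · exact hT y1 hy1
      · exact le_trans (hT y1 hy1) (le_of_lt (hD y2 hy2'))

lemma bstep_fst (j : Int) (s row : List Int) :
    (bstep j (s, false) row).1 =
      if j < (row.length : Int) then
        PySem.List.insert s ((count_le s (PySem.List.pyGetD row j 0) : Nat) : Int)
          (PySem.List.pyGetD row j 0)
      else s := rfl

lemma bstep_snd_eq (j : Int) (s row : List Int) :
    (bstep j (s, false) row).2 =
      (if j ≤ (row.length : Int) then
        decide (0 < (if j < (row.length : Int) then
            (count_le s (PySem.List.pyGetD row j 0) : Int) -
              (count_le s (PySem.List.pyGetD row (j - 1) 0) : Int)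
          else (s.length : Int) - (count_le s (PySem.List.pyGetD row (j - 1) 0) : Int)))
      else false) := rfl

lemma bstep_snd (j : Int) (hj : 1 ≤ j) (s row : List Int) (hs : s.Pairwise (· ≤ ·)) :
    ((bstep j (s, false) row).2 = true) ↔ BadRow j.toNat s row := by
  rw [bstep_snd_eq]
  unfold BadRow
  by_cases hle : j ≤ (row.length : Int)
  · have hjn : j.toNat ≤ row.length := by omega
    have hl1 : (0 : Int) ≤ j - 1 := by omega
    have hl2 : j - 1 < (row.length : Int) := by omega
    have hlo : PySem.List.pyGetD row (j - 1) 0 = row.getD (j.toNat - 1) 0 := by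
      rw [PySem.List.pyGetD_eq_getElem _ _ hl1 hl2,
        List.getD_eq_getElem row 0 (show j.toNat - 1 < row.length by omega)]
      congr 1
      omega
    rw [if_pos hle]
    by_cases hlt : j < (row.length : Int)
    · have hjnlt : j.toNat < row.length := by omega
      have hhi : PySem.List.pyGetD row j 0 = row.getD j.toNat 0 := by
        rw [PySem.List.pyGetD_eq_getElem _ _ (by omega) hlt,
          List.getD_eq_getElem row 0 hjnlt]
      rw [if_pos hlt, hlo, hhi, decide_eq_true_eq]
      simp only [count_le_eq _ _ hs]
      rw [window_iff]
      constructor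
      · rintro ⟨z, hz, h1, h2⟩
        exact ⟨hjn, z, hz, h1, fun _ => h2⟩
      · rintro ⟨_, z, hz, h1, h2⟩
        exact ⟨z, hz, h1, h2 hjnlt⟩
    · have hjnlt : ¬ j.toNat < row.length := by omega
      rw [if_neg hlt, hlo, decide_eq_true_eq]
      simp only [count_le_eq _ _ hs]
      rw [tail_window_iff]
      constructor
      · rintro ⟨z, hz, h1⟩
        exact ⟨hjn, z, hz, h1, fun h => absurd h hjnlt⟩
      · rintro ⟨_, z, hz, h1, _⟩
        exact ⟨z, hz, h1⟩
  · have hjn : ¬ j.toNat ≤ row.length := by omega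
    rw [if_neg hle]
    simp [hjn]

lemma foldl_bstep_true (j : Int) (rows : List (List Int)) (s : List Int) :
    (rows.foldl (bstep j) (s, true)).2 = true := by
  induction rows generalizing s with
  | nil => rfl
  | cons row rows ih => rw [List.foldl_cons]; exact ih s

lemma BadRow_perm (j : Nat) (row : List Int) {s s' : List Int} (h : s.Perm s') :
    BadRow j s row ↔ BadRow j s' row := by
  unfold BadRow
  simp only [h.mem_iff]

lemma colVals_cons (j : Nat) (row : List Int) (rows : List (List Int)) :
    colVals j (row :: rows) =
      (if j < row.length then [row.getD j 0] else []) ++ colVals j rows := by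
  unfold colVals
  by_cases h : j < row.length <;> simp [h]

lemma scan_iff (j : Int) (hj : 1 ≤ j) (rows : List (List Int)) :
    ∀ s : List Int, s.Pairwise (· ≤ ·) →
      (((rows.foldl (bstep j) (s, false)).2 = true) ↔
        ∃ n, ∃ h : n < rows.length,
          BadRow j.toNat (s ++ colVals j.toNat (rows.take n)) rows[n]) := by
  induction rows with
  | nil => intro s _; simp
  | cons row rows ih =>
    intro s hs
    rw [List.foldl_cons]
    by_cases hb : BadRow j.toNat s row
    · have h2 : (bstep j (s, false) row).2 = true := (bstep_snd j hj s row hs).mpr hb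
      have hL : ((rows.foldl (bstep j) (bstep j (s, false) row)).2 = true) := by
        have hpair : bstep j (s, false) row = ((bstep j (s, false) row).1, true) := by
          rw [Prod.ext_iff]; exact ⟨rfl, h2⟩
        rw [hpair]
        exact foldl_bstep_true j rows _
      rw [hL]
      simp only [true_iff]
      exact ⟨0, by simp, by simpa [colVals] using hb⟩
    · have h2 : (bstep j (s, false) row).2 = false :=
        Bool.eq_false_iff.mpr (fun hx => hb ((bstep_snd j hj s row hs).mp hx))
      have hpair : bstep j (s, false) row = ((bstep j (s, false) row).1, false) := by
        rw [Prod.ext_iff]; exact ⟨rfl, h2⟩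
      -- the new seen list: sorted, and a permutation of s ++ colVals j.toNat [row]
      have hkey : ((bstep j (s, false) row).1).Pairwise (· ≤ ·) ∧
          ((bstep j (s, false) row).1).Perm (s ++ colVals j.toNat (row :: []) ) := by
        rw [bstep_fst]
        by_cases hlt : j < (row.length : Int)
        · have hjnlt : j.toNat < row.length := by omega
          have hhi : PySem.List.pyGetD row j 0 = row.getD j.toNat 0 := by
            rw [PySem.List.pyGetD_eq_getElem _ _ (by omega) hlt,
              List.getD_eq_getElem row 0 hjnlt]
          obtain ⟨hperm, hsort⟩ := insert_sorted s (PySem.List.pyGetD row j 0) hs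
          rw [if_pos hlt]
          refine ⟨hsort, ?_⟩
          have hcv : colVals j.toNat [row] = [row.getD j.toNat 0] := by
            simp [colVals, hjnlt]
          rw [hcv, ← hhi]
          exact hperm.trans (List.perm_append_singleton _ _).symm
        · have hjnlt : ¬ j.toNat < row.length := by omega
          rw [if_neg hlt]
          have hcv : colVals j.toNat [row] = [] := by simp [colVals, hjnlt]
          rw [hcv, List.append_nil]
          exact ⟨hs, List.Perm.refl s⟩
      rw [hpair, ih _ hkey.1]
      constructor
      · rintro ⟨n, hn, hB⟩
        refine ⟨n + 1, by simpa using Nat.succ_lt_succ hn, ?_⟩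
        rw [List.getElem_cons_succ, List.take_succ_cons, colVals_cons]
        rw [BadRow_perm j.toNat rows[n] (hkey.2.append_right _)] at hB
        have hre : (s ++ colVals j.toNat [row]) ++ colVals j.toNat (rows.take n) =
            s ++ ((if j.toNat < row.length then [row.getD j.toNat 0] else []) ++
              colVals j.toNat (rows.take n)) := by
          rw [List.append_assoc]
          congr 1
          by_cases hrl : j.toNat < row.length <;>
            simp [colVals, hrl]
        rw [hre] at hB
        exact hB
      · rintro ⟨n, hn, hB⟩
        cases n with
        | zero =>
          exfalso
          apply hb
          simpa [colVals] using hB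
        | succ m =>
          refine ⟨m, by simpa using Nat.lt_of_succ_lt_succ hn, ?_⟩
          rw [List.getElem_cons_succ, List.take_succ_cons, colVals_cons] at hB
          rw [BadRow_perm j.toNat (rows[m]'(Nat.lt_of_succ_lt_succ (by simpa using hn))) (hkey.2.append_right _)]
          have hre : (s ++ colVals j.toNat [row]) ++ colVals j.toNat (rows.take m) =
              s ++ ((if j.toNat < row.length then [row.getD j.toNat 0] else []) ++
                colVals j.toNat (rows.take m)) := by
            rw [List.append_assoc]
            congr 1
            by_cases hrl : j.toNat < row.length <;> simp [colVals, hrl]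
          rw [hre]
          exact hB

lemma mem_colVals (j : Nat) (rows : List (List Int)) (z : Int) :
    z ∈ colVals j rows ↔
      ∃ i, ∃ h : i < rows.length, j < rows[i].length ∧ z = rows[i].getD j 0 := by
  unfold colVals
  rw [List.mem_filterMap]
  constructor
  · rintro ⟨r, hr, hf⟩
    obtain ⟨i, hi, hie⟩ := List.getElem_of_mem hr
    by_cases hl : j < r.length
    · rw [if_pos hl] at hf
      exact ⟨i, hi, by rw [hie]; exact hl, by rw [hie, Option.some.injEq] at *; exact hf.symm⟩
    · rw [if_neg hl] at hf; cases hf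
  · rintro ⟨i, hi, hl, hz⟩
    exact ⟨rows[i], List.getElem_mem hi, by rw [if_pos hl, hz]⟩

lemma ncols_ge (t : List (List Int)) :
    ∀ row ∈ t, (row.length : Int) ≤ ncolsOf t := by
  have heq : ncolsOf t = t.foldl (fun m row => max m ((row.length : Int))) 0 := by
    unfold ncolsOf
    apply PySem.List.foldl_congr_mem
    intro acc x _
    rcases lt_or_ge acc (x.length : Int) with h | h
    · simp [h, max_eq_right (le_of_lt h)]
    · simp [not_lt.mpr h, max_eq_left h]
  rw [heq]
  intro row hr
  exact (PySem.List.le_foldl_max_int t (fun r => (r.length : Int)) 0).2 row hr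

lemma B_false_iff (t : List (List Int)) :
    satisfies_triple_rule_alt t = false ↔
      ∃ j : Int, 1 ≤ j ∧ j ≤ ncolsOf t ∧ ∃ k, ∃ h : k < t.length,
        BadRow j.toNat (colVals j.toNat (t.take k)) t[k] := by
  rw [show satisfies_triple_rule_alt t =
    !((PySem.List.pyRange 1 (ncolsOf t + 1) 1).any
      (fun j => (t.foldl (bstep j) ([], false)).2)) from rfl]
  rw [Bool.not_eq_false', List.any_eq_true]
  constructor
  · rintro ⟨j, hjm, hscan⟩
    rw [PySem.List.mem_pyRange_one] at hjm
    obtain ⟨n, hn, hB⟩ := ((scan_iff j hjm.1 t [] List.Pairwise.nil).mp hscan)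
    exact ⟨j, hjm.1, by omega, n, hn, by simpa using hB⟩
  · rintro ⟨j, hj1, hj2, n, hn, hB⟩
    refine ⟨j, PySem.List.mem_pyRange_one.mpr ⟨hj1, by omega⟩, ?_⟩
    exact (scan_iff j hj1 t [] List.Pairwise.nil).mpr ⟨n, hn, by simpa using hB⟩

lemma Viol_iff_B (t : List (List Int)) :
    (∃ j : Int, 1 ≤ j ∧ j ≤ ncolsOf t ∧ ∃ k, ∃ h : k < t.length,
      BadRow j.toNat (colVals j.toNat (t.take k)) t[k]) ↔ Viol t := by
  constructor
  · rintro ⟨j, hj1, _, k, hk, hle, z, hz, hx, himp⟩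
    obtain ⟨i, hi, hil, hiz⟩ := (mem_colVals _ _ _).mp hz
    rw [List.length_take] at hi
    have hit : i < t.length := by omega
    have hgt : (t.take k)[i] = t[i] := List.getElem_take
    rw [hgt] at hil hiz
    refine ⟨k, hk, i, by omega, j.toNat, by omega, ?_⟩
    have hrk : rowAt t k = t[k] := List.getD_eq_getElem t [] hk
    have hri : rowAt t i = t[i] := List.getD_eq_getElem t [] hit
    rw [hrk, hri]
    exact ⟨hle, hil, by rw [← hiz]; exact hx, fun h => by rw [← hiz]; exact himp h⟩
  · rintro ⟨k, hk, i, hik, jn, hj1, hle, hlt, hx, himp⟩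
    have hit : i < t.length := by omega
    have hrk : rowAt t k = t[k] := List.getD_eq_getElem t [] hk
    have hri : rowAt t i = t[i] := List.getD_eq_getElem t [] hit
    simp only [hrk, hri] at hle hlt hx himp
    refine ⟨(jn : Int), by omega, ?_, k, hk, ?_⟩
    · have := ncols_ge t t[i] (List.getElem_mem hit)
      omega
    · have hjn : (jn : Int).toNat = jn := Int.toNat_natCast jn
      rw [hjn]
      refine ⟨hle, t[i].getD jn 0, ?_, hx, himp⟩
      rw [mem_colVals]
      refine ⟨i, by rw [List.length_take]; omega, ?_, ?_⟩
      · rw [List.getElem_take]; exact hlt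
      · rw [List.getElem_take]

lemma A_false_iff (t : List (List Int)) : satisfies_triple_rule t = false ↔ Viol t := by
  unfold satisfies_triple_rule
  rw [Bool.not_eq_false', List.any_eq_true]
  constructor
  · rintro ⟨iI, hiI, hfi⟩
    rw [PySem.List.mem_pyRange_one] at hiI
    have hilen : iI.toNat < t.length := by omega
    have hcur : PySem.List.pyGetD t iI [] = t[iI.toNat] :=
      PySem.List.pyGetD_eq_getElem _ _ hiI.1 (by omega)
    simp only [hcur, List.any_eq_true] at hfi
    obtain ⟨jz, hjz, hcond⟩ := hfi
    rw [PySem.List.mem_enumerate_iff] at hjz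
    obtain ⟨kk, hkk, rfl⟩ := hjz
    simp only [zero_add] at hcond
    rcases Nat.eq_zero_or_pos kk with hkk0 | hkk0
    · subst hkk0; simp at hcond
    · have hbeq : (((kk : Int)) == 0) = false := by simp; omega
      simp only [hbeq, Bool.false_eq_true, if_false, List.any_eq_true] at hcond
      obtain ⟨kI, hkI, hinner⟩ := hcond
      rw [PySem.List.mem_pyRange_one] at hkI
      have hklen : kI.toNat < t.length := by omega
      have hrowk : PySem.List.pyGetD t kI [] = t[kI.toNat] :=
        PySem.List.pyGetD_eq_getElem _ _ (by omega) (by omega)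
      simp only [hrowk] at hinner
      by_cases h1 : (kk : Int) - 1 < (t[kI.toNat].length : Int)
      swap
      · simp [h1] at hinner
      by_cases h2 : PySem.List.pyGetD t[kI.toNat] ((kk : Int) - 1) 0 < t[iI.toNat][kk]
      swap
      · simp [h1, h2] at hinner
      refine ⟨kI.toNat, hklen, iI.toNat, by omega, kk, by omega, ?_⟩
      have hrk : rowAt t kI.toNat = t[kI.toNat] := List.getD_eq_getElem t [] hklen
      have hri : rowAt t iI.toNat = t[iI.toNat] := List.getD_eq_getElem t [] hilen
      rw [hrk, hri]
      have hxe : PySem.List.pyGetD t[kI.toNat] ((kk : Int) - 1) 0 =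
          t[kI.toNat].getD (kk - 1) 0 := by
        rw [PySem.List.pyGetD_eq_getElem _ _ (by omega) h1,
          List.getD_eq_getElem t[kI.toNat] 0 (show kk - 1 < _ by omega)]
        congr 1
        omega
      have hze : t[iI.toNat][kk] = t[iI.toNat].getD kk 0 :=
        (List.getD_eq_getElem t[iI.toNat] 0 hkk).symm
      refine ⟨by omega, hkk, ?_, ?_⟩
      · rw [← hxe, ← hze]; exact h2
      · intro hlt
        have h3 : (kk : Int) < (t[kI.toNat].length : Int) := by omega
        simp only [h1, h2, if_pos, h3, Bool.not_eq_eq_eq_not, Bool.not_true,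
          decide_eq_false_iff_not, not_lt] at hinner
        have hre : PySem.List.pyGetD t[kI.toNat] (kk : Int) 0 = t[kI.toNat].getD kk 0 := by
          rw [PySem.List.pyGetD_eq_getElem _ _ (by omega) h3,
            List.getD_eq_getElem t[kI.toNat] 0 (show kk < _ by omega)]
          simp
        rw [← hze, ← hre]
        exact hinner
  · rintro ⟨k, hk, i, hik, jn, hj1, hle, hlt, hx, himp⟩
    have hit : i < t.length := by omega
    have hrk : rowAt t k = t[k] := List.getD_eq_getElem t [] hk
    have hri : rowAt t i = t[i] := List.getD_eq_getElem t [] hit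
    simp only [hrk, hri] at hle hlt hx himp
    refine ⟨(i : Int), PySem.List.mem_pyRange_one.mpr ⟨by omega, by omega⟩, ?_⟩
    have hcur : PySem.List.pyGetD t (i : Int) [] = t[i] := by
      rw [PySem.List.pyGetD_natCast]
      exact List.getD_eq_getElem t [] hit
    simp only [hcur, List.any_eq_true]
    refine ⟨((jn : Int), t[i][jn]'hlt), (by rw [PySem.List.mem_enumerate_iff]; exact ⟨jn, hlt, by simp⟩), ?_⟩
    have hbeq : (((jn : Int)) == 0) = false := by simp; omega
    simp only [hbeq, Bool.false_eq_true, if_false, List.any_eq_true]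
    refine ⟨(k : Int), PySem.List.mem_pyRange_one.mpr ⟨by omega, by omega⟩, ?_⟩
    have hrowk : PySem.List.pyGetD t (k : Int) [] = t[k] := by
      rw [PySem.List.pyGetD_natCast]
      exact List.getD_eq_getElem t [] hk
    simp only [hrowk]
    have h1 : (jn : Int) - 1 < (t[k].length : Int) := by omega
    have hxe : PySem.List.pyGetD t[k] ((jn : Int) - 1) 0 = t[k].getD (jn - 1) 0 := by
      rw [PySem.List.pyGetD_eq_getElem _ _ (by omega) h1,
        List.getD_eq_getElem t[k] 0 (show jn - 1 < _ by omega)]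
      congr 1
      omega
    have hze : t[i][jn]'hlt = t[i].getD jn 0 := (List.getD_eq_getElem t[i] 0 hlt).symm
    rw [if_pos h1, hxe]
    rw [if_pos (show t[k].getD (jn - 1) 0 < t[i][jn]'hlt by rw [hze]; exact hx)]
    by_cases h3 : (jn : Int) < (t[k].length : Int)
    · rw [if_pos h3]
      have hre : PySem.List.pyGetD t[k] (jn : Int) 0 = t[k].getD jn 0 := by
        rw [PySem.List.pyGetD_eq_getElem _ _ (by omega) h3,
          List.getD_eq_getElem t[k] 0 (show jn < _ by omega)]
        simp
      rw [hre]
      simp only [Bool.not_eq_eq_eq_not, Bool.not_true, decide_eq_false_iff_not, not_lt]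
      rw [hze]
      exact himp (by omega)
    · rw [if_neg h3]

-- ===== VERDICT (by name: the statement is the Claim_ definition above) =====
theorem satisfies_triple_rule_spec : Claim_equal_satisfies_triple_rule := by
  intro t _
  unfold Spec_satisfies_triple_rule
  have hA := A_false_iff t
  have hB := (B_false_iff t).trans (Viol_iff_B t)
  cases hAe : satisfies_triple_rule t <;> cases hBe : satisfies_triple_rule_alt t
  · rfl
  · exact absurd (hB.mpr (hA.mp hAe)) (by simp [hBe])
  · exact absurd (hA.mpr (hB.mp hBe)) (by simp [hAe])
  · rfl
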